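-- pv_equiv track=rewrite | github.com/gitblanc/1-curso | 2º Cuatrimestre/Fundamentos/Funciones.py | extrae_negativos
-- ===== SOURCE A (Python) =====
-- def extrae_negativos(negativos):
--     listaNegs = []
--
--     for neg in negativos:
--         if(neg < 0):
--             listaNegs.append(neg)
--
--     for neg in listaNegs:
--         negativos.remove(neg)
--
--     return listaNegs
-- ===== SOURCE B (Python) =====
-- def extrae_negativos(negativos):
--     listaNegs = []
--     i = 0
--     while i < len(negativos):
--         if negativos[i] < 0:
--             listaNegs.append(negativos.pop(i))
--         else:
--             i += 1
--     return listaNegs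
-- ===== Notes on version B (the rewrite author's own statement) =====
-- stated objective: alternative
-- what changed: Replaces A's two phases (collect the negatives, then one value-based list.remove per negative that rescans the list from the front) with a single index-driven in-place scan that either pops the current element or advances the index, collecting as it goes.
import Mathlib
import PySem

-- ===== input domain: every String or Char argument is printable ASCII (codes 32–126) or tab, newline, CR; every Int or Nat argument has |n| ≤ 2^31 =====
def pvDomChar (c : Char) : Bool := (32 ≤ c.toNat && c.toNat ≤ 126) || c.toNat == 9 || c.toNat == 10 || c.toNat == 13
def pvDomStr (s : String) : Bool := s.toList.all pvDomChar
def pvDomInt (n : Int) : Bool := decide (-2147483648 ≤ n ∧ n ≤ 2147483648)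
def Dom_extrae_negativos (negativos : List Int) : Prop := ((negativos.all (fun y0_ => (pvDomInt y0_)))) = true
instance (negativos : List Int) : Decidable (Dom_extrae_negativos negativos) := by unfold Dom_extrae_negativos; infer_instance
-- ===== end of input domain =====

-- B fuses A's collect-then-remove passes into one index-driven in-place scan (pop or advance).
-- Both versions mutate the Python argument (removing the negatives); the equivalence proved
-- here is about the RETURN value only (the mutations happen to coincide as well, but that is
-- not part of the claim).

-- ===== PORT A =====
-- first loop: collect negatives (the second Python loop only mutates the argument and does
-- not influence the returned listaNegs, so it contributes nothing to the returned value)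
def extrae_negativos (negativos : List Int) : List Int :=
  negativos.foldl (fun listaNegs neg => if neg < 0 then listaNegs ++ [neg] else listaNegs) []

-- ===== PORT B =====
-- while i < len(negativos): pop a negative at i (collecting it) or advance i
def extraeAltLoop (negativos : List Int) (i : Nat) (listaNegs : List Int) : List Int :=
  if h : i < negativos.length then
    if negativos[i] < 0 then
      extraeAltLoop (negativos.eraseIdx i) i (listaNegs ++ [negativos[i]])
    else
      extraeAltLoop negativos (i + 1) listaNegs
  else
    listaNegs
termination_by negativos.length - i
decreasing_by
  · simp [List.length_eraseIdx, h]; omega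
  · omega

def extrae_negativos_alt (negativos : List Int) : List Int :=
  extraeAltLoop negativos 0 []

-- ===== PRECONDITION & SPEC =====
def Spec_extrae_negativos (negativos : List Int) (out : List Int) : Prop := out = extrae_negativos_alt negativos
instance (negativos : List Int) (out : List Int) : Decidable (Spec_extrae_negativos negativos out) := by unfold Spec_extrae_negativos; infer_instance

-- ===== CLAIM (what is proved, stated in full; the proofs are below) =====
def Claim_equal_extrae_negativos : Prop := ∀ (negativos : List Int), Dom_extrae_negativos negativos → Spec_extrae_negativos negativos (extrae_negativos negativos)

-- ===== LEMMAS AND PROOFS =====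

-- A's collect loop is filter (· < 0), appended after the accumulator
theorem extraeA_foldl (l : List Int) (acc : List Int) :
    l.foldl (fun listaNegs neg => if neg < 0 then listaNegs ++ [neg] else listaNegs) acc
      = acc ++ l.filter (fun x => decide (x < 0)) := by
  induction l generalizing acc with
  | nil => simp
  | cons x xs ih =>
      by_cases hx : x < 0 <;> simp [List.foldl, hx, ih]

-- popping index i keeps the unscanned suffix: drop i (eraseIdx i l) = drop (i+1) l
theorem drop_eraseIdx_self (l : List Int) (i : Nat) (h : i < l.length) :
    (l.eraseIdx i).drop i = l.drop (i + 1) := by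
  induction l generalizing i with
  | nil => simp
  | cons x xs ih =>
    cases i with
    | zero => simp
    | succ n => simp at h; simp [List.eraseIdx, ih n (by omega)]

-- B's loop collects exactly the negatives of the unscanned suffix, after the accumulator
theorem extraeAltLoop_eq (l : List Int) (i : Nat) (acc : List Int) :
    extraeAltLoop l i acc = acc ++ (l.drop i).filter (fun x => decide (x < 0)) := by
  induction l, i, acc using extraeAltLoop.induct with
  | case1 l i acc h hneg ih =>
      rw [extraeAltLoop, dif_pos h, if_pos hneg, ih, drop_eraseIdx_self l i h,
        List.append_assoc, List.singleton_append]
      conv_rhs => rw [List.drop_eq_getElem_cons h,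
        List.filter_cons_of_pos (by simpa using hneg)]
  | case2 l i acc h hneg ih =>
      rw [extraeAltLoop, dif_pos h, if_neg hneg, ih]
      conv_rhs => rw [List.drop_eq_getElem_cons h,
        List.filter_cons_of_neg (by simpa using hneg)]
  | case3 l i acc h =>
      rw [extraeAltLoop, dif_neg h]
      simp [List.drop_eq_nil_of_le (Nat.le_of_not_lt h)]

-- ===== VERDICT (by name: the statement is the Claim_ definition above) =====
theorem extrae_negativos_spec : Claim_equal_extrae_negativos := by
  intro l _
  unfold Spec_extrae_negativos extrae_negativos extrae_negativos_alt
  rw [extraeA_foldl, extraeAltLoop_eq]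
  simp
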